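-- pv_equiv track=rewrite | github.com/JYKkkk/dailyAlgorithm | sharksharkec2/230218_PS_인사고과.py | solution
-- ===== SOURCE A (Python) =====
-- def solution(scores):
--
--     N = len(scores)
--
--     # value = [점수, scores의 index]
--     ATTCOL = [[att, col, idx] for idx, (att, col) in enumerate(scores)]
--     ATTCOL.sort(key = lambda x: (-x[0], x[1]))
--
--     # index = scores의 index, value = 인센티브 여부
--     VALID = [True for _ in range(N)]
--
--     # 근무 태도 점수가 큰 순서대로 순회
--     max_col = -1
--     for att, col, idx in ATTCOL:
--
--         # 이전까지의 사원(자신보다 근무 태도 점수가 큼) 중 동료 평가 점수가 자신보다 큰 사원이 있을 경우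
--         if col < max_col:
--             VALID[idx] = False
--         else:
--             max_col = col
--
--     # 인센티브를 못받는 경우
--     if not VALID[0]:
--         return -1
--
--
--     # index = 석차, value = [인사 점수, scores의 index]
--     TOTAL = [att+col for index, (att, col) in enumerate(scores) if VALID[index]]
--     TOTAL.sort(key = lambda x: -x)
--
--     # 완호와 같은 점수일 경우를 찾는다.
--     wanho = sum(scores[0])
--     for rank, score in enumerate(TOTAL):
--         if score == wanho:
--             return rank+1
--
--     return 0
-- ===== SOURCE B (Python) =====
-- def solution(scores):
--     wanho = scores[0][0] + scores[0][1]
--     order = sorted(((att, col, idx) for idx, (att, col) in enumerate(scores)),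
--                    key=lambda t: (-t[0], t[1]))
--     max_col = -1
--     wanho_ok = False
--     better = 0
--     for att, col, idx in order:
--         if col < max_col:
--             continue
--         max_col = col
--         if idx == 0:
--             wanho_ok = True
--         if att + col > wanho:
--             better += 1
--     return better + 1 if wanho_ok else -1
-- ===== Notes on version B (the rewrite author's own statement) =====
-- stated objective: simpler
-- what changed: B fuses everything after the dominance sort into one counting pass (running max_col, a wanho-seen flag, and a count of strictly-greater totals), eliminating A's VALID array, the TOTAL list, its second sort and the linear rank scan.
-- outside the precondition, e.g. on solution([]): A raises IndexError, B raises IndexError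
import Mathlib
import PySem

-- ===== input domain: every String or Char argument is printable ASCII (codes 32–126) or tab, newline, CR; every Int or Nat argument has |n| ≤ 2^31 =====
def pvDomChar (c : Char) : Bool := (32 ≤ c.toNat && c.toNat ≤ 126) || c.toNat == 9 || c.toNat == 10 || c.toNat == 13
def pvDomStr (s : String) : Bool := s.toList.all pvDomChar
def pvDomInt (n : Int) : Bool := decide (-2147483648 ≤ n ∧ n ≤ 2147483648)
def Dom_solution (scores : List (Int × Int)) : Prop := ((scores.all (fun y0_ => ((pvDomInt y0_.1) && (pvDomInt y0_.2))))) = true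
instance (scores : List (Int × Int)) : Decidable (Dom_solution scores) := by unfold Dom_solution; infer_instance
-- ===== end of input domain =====

-- B fuses everything after the dominance sort into one counting pass (flag + count of strictly-greater
-- totals), dropping A's VALID array, TOTAL list, second sort and rank scan (objective: simpler).
-- A mutates no argument; equivalence is about the return value.

-- ===== PORT A =====
-- the body of A's first for-loop (max_col, VALID) — VALID[idx] = False is pySetD (idx ≥ 0 here)
def solutionStep (st : Int × List Bool) (t : Int × Int × Int) : Int × List Bool :=
  if t.2.1 < st.1 then (st.1, PySem.List.pySetD st.2 t.2.2 false) else (t.2.1, st.2)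

-- A's final for-loop: first rank whose score equals wanho, else 0
def solutionScan : List Int → Int → Int → Int
  | [], _, _ => 0
  | s :: rest, w, rank => if s = w then rank + 1 else solutionScan rest w (rank + 1)

def solution (scores : List (Int × Int)) : Int :=
  let N := scores.length
  let ATTCOL := PySem.List.sorted2
      ((PySem.List.enumerate scores).map (fun p => (p.2.1, p.2.2, p.1)))
      (fun t => -t.1) (fun t => t.2.1) false
  let VALID := (ATTCOL.foldl solutionStep (-1, List.replicate N true)).2
  if PySem.List.pyGetD VALID 0 true = false then -1
  else
    let TOTAL := ((PySem.List.enumerate scores).filter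
        (fun p => PySem.List.pyGetD VALID p.1 true)).map (fun p => p.2.1 + p.2.2)
    let TOTALs := PySem.List.sorted TOTAL (fun x => -x) false
    let wanho := (PySem.List.pyGetD scores 0 ((0 : Int), (0 : Int))).1
               + (PySem.List.pyGetD scores 0 ((0 : Int), (0 : Int))).2
    solutionScan TOTALs wanho 0

-- ===== PORT B =====
-- the body of B's single fused loop: state (max_col, wanho_ok, better)
def solutionAltStep (wanho : Int) (st : Int × Bool × Int) (t : Int × Int × Int) : Int × Bool × Int :=
  if t.2.1 < st.1 then st
  else (t.2.1, st.2.1 || decide (t.2.2 = 0),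
        st.2.2 + if t.1 + t.2.1 > wanho then 1 else 0)

def solution_alt (scores : List (Int × Int)) : Int :=
  let wanho := (PySem.List.pyGetD scores 0 ((0 : Int), (0 : Int))).1
             + (PySem.List.pyGetD scores 0 ((0 : Int), (0 : Int))).2
  let order := PySem.List.sorted2
      ((PySem.List.enumerate scores).map (fun p => (p.2.1, p.2.2, p.1)))
      (fun t => -t.1) (fun t => t.2.1) false
  let st := order.foldl (solutionAltStep wanho) (-1, false, 0)
  if st.2.1 then st.2.2 + 1 else -1

-- ===== PRECONDITION & SPEC =====
-- A evaluates scores[0]; on the empty list it raises IndexError, so Pre_ excludes only [].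
def Pre_solution (scores : List (Int × Int)) : Prop := scores ≠ []
instance (scores : List (Int × Int)) : Decidable (Pre_solution scores) := by
  unfold Pre_solution; infer_instance

def pvWitness_solution : (List (Int × Int)) := [(4, 5), (3, 8), (5, 5)]

def Spec_solution (scores : List (Int × Int)) (out : Int) : Prop := out = solution_alt scores
instance (scores : List (Int × Int)) (out : Int) : Decidable (Spec_solution scores out) := by
  unfold Spec_solution; infer_instance

-- ===== CLAIM (what is proved, stated in full; the proofs are below) =====
def Claim_equal_solution : Prop := ∀ (scores : List (Int × Int)), Dom_solution scores →
  Pre_solution scores → Spec_solution scores (solution scores)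

-- ===== LEMMAS AND PROOFS =====

-- the elements the running-max loop keeps, and the indices it drops
def keptL : Int → List (Int × Int × Int) → List (Int × Int × Int)
  | _, [] => []
  | m, t :: ts => if t.2.1 < m then keptL m ts else t :: keptL t.2.1 ts

def droppedL : Int → List (Int × Int × Int) → List Int
  | _, [] => []
  | m, t :: ts => if t.2.1 < m then t.2.2 :: droppedL m ts else droppedL t.2.1 ts

theorem pyGetD_pySetD_int (V : List Bool) (i j : Int) (v d : Bool)
    (hi0 : 0 ≤ i) (hil : i < (V.length : Int)) (hj : 0 ≤ j) :
    PySem.List.pyGetD (PySem.List.pySetD V i v) j d =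
      if j = i then v else PySem.List.pyGetD V j d := by
  obtain ⟨n, rfl⟩ := Int.eq_ofNat_of_zero_le hi0
  obtain ⟨k, rfl⟩ := Int.eq_ofNat_of_zero_le hj
  rw [PySem.List.pySetD_natCast, PySem.List.pyGetD_natCast, PySem.List.pyGetD_natCast]
  rw [List.getD_eq_getElem?_getD, List.getD_eq_getElem?_getD, List.getElem?_set]
  have hnl : n < V.length := by exact_mod_cast hil
  by_cases hkn : k = n
  · subst hkn; simp [hnl]
  · simp [hkn, Ne.symm hkn]

theorem dropped_subset (L : List (Int × Int × Int)) :
    ∀ m i, i ∈ droppedL m L → i ∈ L.map (fun t => t.2.2) := by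
  induction L with
  | nil => intro m i h; simp [droppedL] at h
  | cons t ts ih =>
    intro m i h
    simp only [droppedL] at h
    simp only [List.map_cons, List.mem_cons]
    split_ifs at h with hc
    · rcases List.mem_cons.mp h with h | h
      · exact Or.inl h
      · exact Or.inr (ih m i h)
    · exact Or.inr (ih t.2.1 i h)

theorem kept_eq_filter (L : List (Int × Int × Int)) :
    ∀ m, (L.map (fun t => t.2.2)).Nodup →
    keptL m L = L.filter (fun t => !decide (t.2.2 ∈ droppedL m L)) := by
  induction L with
  | nil => intro m _; simp [keptL]
  | cons t ts ih =>
    intro m h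
    rw [List.map_cons, List.nodup_cons] at h
    obtain ⟨hhd, htl⟩ := h
    simp only [keptL, droppedL]
    split_ifs with hc
    · rw [List.filter_cons]
      have hpt : (!decide (t.2.2 ∈ t.2.2 :: droppedL m ts)) = false := by simp
      rw [hpt, if_neg (by simp)]
      rw [ih m htl]
      apply List.filter_congr
      intro x hx
      have hne : x.2.2 ≠ t.2.2 := by
        intro he; exact hhd (he ▸ List.mem_map_of_mem hx)
      simp [List.mem_cons, hne]
    · rw [List.filter_cons]
      have hpt : (!decide (t.2.2 ∈ droppedL t.2.1 ts)) = true := by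
        simp only [Bool.not_eq_true', decide_eq_false_iff_not]
        intro hmem
        exact hhd (dropped_subset ts t.2.1 t.2.2 hmem)
      rw [hpt, if_pos rfl, ih t.2.1 htl]

theorem foldB_char (w : Int) (L : List (Int × Int × Int)) :
    ∀ m f c, (L.foldl (solutionAltStep w) (m, f, c)).2 =
      (f || decide ((0 : Int) ∈ (keptL m L).map (fun t => t.2.2)),
       c + ((keptL m L).countP (fun t => decide (t.1 + t.2.1 > w)) : Int)) := by
  induction L with
  | nil => intro m f c; simp [keptL]
  | cons t ts ih =>
    intro m f c
    simp only [List.foldl_cons, solutionAltStep]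
    by_cases hc : t.2.1 < m
    · rw [if_pos hc, ih]; simp only [keptL, if_pos hc]
    · rw [if_neg hc, ih]
      simp only [keptL, if_neg hc, List.map_cons, List.mem_cons, List.countP_cons,
        Prod.mk.injEq]
      refine ⟨?_, ?_⟩
      · simp [Bool.or_assoc, eq_comm]
      · by_cases hp : t.1 + t.2.1 > w
        · simp only [hp, decide_true, if_true]
          push_cast
          simp
          ring
        · simp [hp]

theorem foldA_getD (L : List (Int × Int × Int)) :
    ∀ m (V : List Bool) (j : Int), 0 ≤ j →
      (∀ t ∈ L, 0 ≤ t.2.2 ∧ t.2.2 < (V.length : Int)) →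
      PySem.List.pyGetD ((L.foldl solutionStep (m, V)).2) j true =
        (PySem.List.pyGetD V j true && !decide (j ∈ droppedL m L)) := by
  induction L with
  | nil => intro m V j _ _; simp [droppedL]
  | cons t ts ih =>
    intro m V j hj hb
    obtain ⟨ht0, htl⟩ := hb t (List.mem_cons_self ..)
    have hbts : ∀ x ∈ ts, 0 ≤ x.2.2 ∧ x.2.2 < (V.length : Int) :=
      fun x hx => hb x (List.mem_cons_of_mem _ hx)
    simp only [List.foldl_cons, solutionStep]
    split_ifs with hc
    · have hlen : (PySem.List.pySetD V t.2.2 false).length = V.length := by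
        simp [PySem.List.length_pySetD]
      rw [ih m _ j hj (by rw [hlen]; exact hbts)]
      rw [pyGetD_pySetD_int V t.2.2 j false true ht0 htl hj]
      simp only [droppedL, if_pos hc, List.mem_cons]
      by_cases hje : j = t.2.2
      · simp [hje]
      · simp [hje]
    · rw [ih t.2.1 V j hj hbts]
      simp only [droppedL, if_neg hc]

theorem scan_rank (S : List Int) :
    ∀ (w r : Int), S.Pairwise (fun a b => -a ≤ -b) → w ∈ S →
      solutionScan S w r = r + (S.countP (fun x => decide (x > w)) : Int) + 1 := by
  induction S with
  | nil => intro w r _ h; simp at h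
  | cons s rest ih =>
    intro w r hp hm
    rw [List.pairwise_cons] at hp
    obtain ⟨hall, htl⟩ := hp
    by_cases hs : s = w
    · subst hs
      have hz : rest.countP (fun x => decide (x > s)) = 0 := by
        rw [List.countP_eq_zero]
        intro x hx
        have := hall x hx
        simp only [decide_eq_true_eq]; omega
      simp [solutionScan, hz]
    · have hw : w ∈ rest := by
        rcases List.mem_cons.mp hm with h | h
        · exact absurd h.symm hs
        · exact h
      have hws : w < s := by
        have := hall w hw
        rcases lt_or_eq_of_le (by omega : w ≤ s) with h | h
        · exact h
        · exact absurd h.symm hs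
      rw [List.countP_cons]
      simp only [solutionScan, if_neg hs]
      rw [ih w (r + 1) htl hw]
      have : decide (s > w) = true := by simp [hws]
      rw [this]
      simp only [if_pos trivial]
      push_cast
      omega

theorem pyGetD_replicate_true (n : Nat) (j : Int) :
    PySem.List.pyGetD (List.replicate n true) j true = true := by
  unfold PySem.List.pyGetD PySem.List.pyGet? PySem.List.pyIdx?
  split_ifs <;> simp [List.getElem?_replicate] <;> split_ifs <;> simp

-- ===== VERDICT (by name: the statement is the Claim_ definition above) =====
theorem solution_spec : Claim_equal_solution := by
  intro scores _ hpre
  unfold Spec_solution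
  obtain ⟨s0, rest, rfl⟩ : ∃ a l, scores = a :: l := by
    cases scores with
    | nil => exact absurd rfl hpre
    | cons a l => exact ⟨a, l, rfl⟩
  set sc : List (Int × Int) := s0 :: rest with hsc
  simp only [solution, solution_alt]
  set E := PySem.List.enumerate sc with hE
  set A0 := E.map (fun p => (p.2.1, p.2.2, p.1)) with hA0
  set L := PySem.List.sorted2 A0 (fun t => -t.1) (fun t => t.2.1) false with hL
  set w := (PySem.List.pyGetD sc 0 ((0 : Int), (0 : Int))).1
         + (PySem.List.pyGetD sc 0 ((0 : Int), (0 : Int))).2 with hw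
  set D := droppedL (-1) L with hD
  set VALID := (L.foldl solutionStep (-1, List.replicate sc.length true)).2 with hV
  have hperm : L.Perm A0 := PySem.List.sorted2_perm A0 _ _ false
  have hmapidx : A0.map (fun t => t.2.2) = E.map (fun p => p.1) := by
    rw [hA0, List.map_map]; rfl
  have hnodupE : (E.map (fun p => p.1)).Nodup := by
    have h1 : (E.map (fun p => p.1)).Pairwise (· < ·) :=
      (PySem.List.pairwise_lt_enumerate sc 0).map _ (fun a b h => h)
    exact h1.imp (fun h => ne_of_lt h)
  have hnodup : (L.map (fun t => t.2.2)).Nodup := by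
    rw [(hperm.map _).nodup_iff, hmapidx]; exact hnodupE
  have hbound : ∀ t ∈ L, 0 ≤ t.2.2 ∧ t.2.2 < (sc.length : Int) := by
    intro t ht
    have htA : t ∈ A0 := hperm.mem_iff.1 ht
    obtain ⟨p, hpE, rfl⟩ := List.mem_map.1 htA
    obtain ⟨k, hk, rfl⟩ := (PySem.List.mem_enumerate_iff sc 0 p).1 hpE
    constructor
    · simp
    · simpa using hk
  have hVj : ∀ j : Int, 0 ≤ j →
      PySem.List.pyGetD VALID j true = !decide (j ∈ D) := by
    intro j hj
    rw [hV, foldA_getD L (-1) _ j hj (by simpa using hbound),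
      pyGetD_replicate_true, Bool.true_and]
  have ht0L : (s0.1, s0.2, (0 : Int)) ∈ L := by
    rw [hperm.mem_iff]
    refine List.mem_map.2 ⟨(0, s0), ?_, rfl⟩
    rw [hE, hsc, PySem.List.enumerate_cons]
    exact List.mem_cons_self ..
  have hw0 : w = s0.1 + s0.2 := by
    rw [hw, PySem.List.pyGetD_of_nonneg _ _ le_rfl]
    simp [hsc]
  have hBfold := foldB_char w L (-1) false 0
  have hkf := kept_eq_filter L (-1) hnodup
  have hflag_iff : ((0 : Int) ∈ (keptL (-1) L).map (fun t => t.2.2)) ↔ (0 : Int) ∉ D := by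
    rw [hkf]
    constructor
    · rintro h
      obtain ⟨t, htm, hidx0⟩ := List.mem_map.1 h
      obtain ⟨htL, hpt⟩ := List.mem_filter.1 htm
      rw [hidx0] at hpt
      simpa using hpt
    · intro h0
      refine List.mem_map.2 ⟨(s0.1, s0.2, (0 : Int)), List.mem_filter.2 ⟨ht0L, ?_⟩, rfl⟩
      simpa using h0
  have hBflag : (L.foldl (solutionAltStep w) (-1, false, 0)).2.1 =
      decide ((0 : Int) ∈ (keptL (-1) L).map (fun t => t.2.2)) := by
    rw [hBfold]; simp
  have hBcnt : (L.foldl (solutionAltStep w) (-1, false, 0)).2.2 =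
      ((keptL (-1) L).countP (fun t => decide (t.1 + t.2.1 > w)) : Int) := by
    rw [hBfold]; simp
  by_cases hzero : (0 : Int) ∈ D
  · -- Wanho dominated: both sides return -1
    rw [if_pos (by rw [hVj 0 le_rfl]; simp [hzero])]
    rw [if_neg (by rw [hBflag]; simp [hflag_iff, hzero])]
  · -- Wanho valid
    rw [if_neg (by rw [hVj 0 le_rfl]; simp [hzero])]
    rw [if_pos (by rw [hBflag]; simp [hflag_iff, hzero])]
    set TOTAL := (E.filter (fun p => PySem.List.pyGetD VALID p.1 true)).map
        (fun p => p.2.1 + p.2.2) with hT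
    have hpw : (PySem.List.sorted TOTAL (fun x => -x) false).Pairwise
        (fun a b => -a ≤ -b) := PySem.List.sorted_pairwise TOTAL (fun x => -x)
    have hwmem : w ∈ PySem.List.sorted TOTAL (fun x => -x) false := by
      rw [PySem.List.mem_sorted]
      refine List.mem_map.2 ⟨((0 : Int), s0), List.mem_filter.2 ⟨?_, ?_⟩, ?_⟩
      · rw [hE, hsc, PySem.List.enumerate_cons]; exact List.mem_cons_self ..
      · rw [hVj 0 le_rfl]; simp [hzero]
      · rw [hw0]
    rw [scan_rank _ w 0 hpw hwmem]
    have hcA : (PySem.List.sorted TOTAL (fun x => -x) false).countP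
        (fun x => decide (x > w)) =
        E.countP (fun p => decide (p.2.1 + p.2.2 > w) && !decide (p.1 ∈ D)) := by
      rw [List.Perm.countP_eq _ (PySem.List.sorted_perm TOTAL _ false)]
      rw [hT, List.countP_map, List.countP_filter]
      apply List.countP_congr
      intro p hp
      obtain ⟨k, hk, rfl⟩ := (PySem.List.mem_enumerate_iff sc 0 p).1 hp
      rw [Function.comp]
      rw [hVj (0 + (k : Int)) (by omega)]
    have hcB : (keptL (-1) L).countP (fun t => decide (t.1 + t.2.1 > w)) =
        E.countP (fun p => decide (p.2.1 + p.2.2 > w) && !decide (p.1 ∈ D)) := by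
      rw [hkf, List.countP_filter, List.Perm.countP_eq _ hperm, hA0, List.countP_map]
      rfl
    rw [hBcnt, hcB, ← hcA]
    push_cast
    ring
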